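-- pv_equiv track=rewrite | github.com/lichkovahadaniil/research_course_work | shuffler.py | extract_actions_blocks
-- ===== SOURCE A (Python) =====
-- def extract_actions_blocks(domain_text: str):
--     """
--     Возвращает: (header, list_of_action_blocks, footer)
--     Гарантирует побайтовое совпадение с оригиналом при записи canonical.
--     """
--     action_blocks = []
--     i = 0
--     n = len(domain_text)
--
--     while i < n:
--         # Пропускаем комментарии (если будут)
--         if domain_text[i] == ';':
--             start = i
--             while i < n and domain_text[i] != '\n':
--                 i += 1
--             if i < n:
--                 i += 1
--             continue
--
--         # Нашли начало действия
--         if i + 8 <= n and domain_text[i:i+8].lower() == '(:action':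
--             # Захватываем ВЕСЬ leading whitespace перед (:action
--             start = i
--             while start > 0 and domain_text[start - 1] in ' \t\n':
--                 start -= 1
--
--             # Парсим action до баланса скобок
--             depth = 0
--             j = i
--             while j < n:
--                 if domain_text[j] == '(':
--                     depth += 1
--                 elif domain_text[j] == ')':
--                     depth -= 1
--                     if depth == 0:
--                         action_block = domain_text[start:j + 1]
--                         action_blocks.append(action_block)
--                         i = j + 1
--                         break
--                 j += 1
--             continue
--
--         i += 1
--
--     # === Теперь точно вырезаем header и footer из оригинального текста ===
--     if not action_blocks:
--         return domain_text, [], ''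
--
--     # Header — всё до первого action (включая его leading whitespace — он уже в action_blocks[0])
--     first_action_text = action_blocks[0]
--     first_pos = domain_text.find(first_action_text)
--     header = domain_text[:first_pos].rstrip()
--
--     # Footer — всё после ПОСЛЕДНЕГО action
--     last_action_text = action_blocks[-1]
--     last_pos = domain_text.rfind(last_action_text) + len(last_action_text)
--     footer = domain_text[last_pos:].lstrip('\n')
--
--     return header, action_blocks, footer
-- ===== SOURCE B (Python) =====
-- import re
--
-- # One token pattern: a comment run or an action opener (case-insensitive).
-- _TOKEN = re.compile(r';[^\n]*|\(:action', re.IGNORECASE)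
--
--
-- def extract_actions_blocks(domain_text: str):
--     n = len(domain_text)
--     blocks = []
--     pos = 0
--     while True:
--         m = _TOKEN.search(domain_text, pos)
--         if m is None:
--             break
--         i = m.start()
--         if domain_text[i] == ';':
--             # a comment: resume scanning right after it
--             pos = m.end()
--             continue
--         # an action opener: include the leading whitespace run before it
--         start = len(domain_text[:i].rstrip(' \t\n'))
--         depth = 0
--         j = i
--         while j < n:
--             c = domain_text[j]
--             depth += (c == '(') - (c == ')')
--             if depth == 0:
--                 blocks.append(domain_text[start:j + 1])
--                 break
--             j += 1
--         pos = j + 1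
--     if not blocks:
--         return domain_text, [], ''
--     first_pos = domain_text.find(blocks[0])
--     header = domain_text[:first_pos].rstrip()
--     last_pos = domain_text.rfind(blocks[-1]) + len(blocks[-1])
--     footer = domain_text[last_pos:].lstrip('\n')
--     return header, blocks, footer
-- ===== Notes on version B (the rewrite author's own statement) =====
-- stated objective: faster
-- what changed: A scans character by character in a Python-level loop; B repeatedly regex-searches for the next token (comment run or case-insensitive '(:action'), slices each action out with an arithmetic paren-balance counter and an rstrip-based leading-whitespace backtrack, keeping the same header/footer extraction.
-- outside the precondition, e.g. on extract_actions_blocks(';(:action\nx'): A returns (';(:action\nx', [], ''), B returns (';(:action\nx', [], ''); on extract_actions_blocks('(:action'): A does not finish within the time limit, B returns ('(:action', [], '')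
import Mathlib
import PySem

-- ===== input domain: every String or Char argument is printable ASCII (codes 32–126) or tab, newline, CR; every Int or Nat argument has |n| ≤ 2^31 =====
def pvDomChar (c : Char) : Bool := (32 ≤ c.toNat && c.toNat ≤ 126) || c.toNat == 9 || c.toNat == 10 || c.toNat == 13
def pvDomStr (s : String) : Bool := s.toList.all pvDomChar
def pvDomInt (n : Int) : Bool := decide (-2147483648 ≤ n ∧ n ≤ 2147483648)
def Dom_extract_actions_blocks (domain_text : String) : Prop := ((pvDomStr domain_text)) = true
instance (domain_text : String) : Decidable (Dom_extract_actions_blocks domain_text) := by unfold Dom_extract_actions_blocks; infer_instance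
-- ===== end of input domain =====

-- B replaces A's character-by-character outer scan by a regex-style token search (next comment/action
-- occurrence), an arithmetic paren-balance scan and an rstrip-based whitespace backtrack; same return value.

-- ===== PORT A =====

-- '(:action'
def pvActionKey : List Char := ['(', ':', 'a', 'c', 't', 'i', 'o', 'n']

-- A: `i + 8 <= n and domain_text[i:i+8].lower() == '(:action'`
def pvA_actionAt (cs : List Char) (i : Nat) : Bool :=
  decide (i + 8 ≤ cs.length) &&
    (PySem.Chars.lower (PySem.List.slice cs (some (i : Int)) (some ((i : Int) + 8))) == pvActionKey)

-- A's comment branch: `while i < n and domain_text[i] != '\n': i += 1` then `if i < n: i += 1`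
-- (getD is exact here: it is only read under the `i < n` guard)
def pvA_skipComment (cs : List Char) (i : Nat) : Nat :=
  if h : i < cs.length then
    if cs.getD i ' ' = '\n' then i + 1 else pvA_skipComment cs (i + 1)
  else i
termination_by cs.length - i
decreasing_by all_goals omega

-- A: `while start > 0 and domain_text[start - 1] in ' \t\n': start -= 1`
def pvA_back (cs : List Char) (start : Nat) : Nat :=
  if 0 < start ∧ cs.getD (start - 1) ' ' ∈ [' ', '\t', '\n'] then pvA_back cs (start - 1)
  else start
termination_by start
decreasing_by all_goals omega

-- A's inner loop: walk j, depth += 1 on '(', depth -= 1 on ')', return j when depth hits 0 on a ')'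
def pvA_scan (cs : List Char) (j : Nat) (depth : Int) : Option Nat :=
  if h : j < cs.length then
    let c := cs.getD j ' '
    if c = '(' then pvA_scan cs (j + 1) (depth + 1)
    else if c = ')' then
      if depth - 1 = 0 then some j else pvA_scan cs (j + 1) (depth - 1)
    else pvA_scan cs (j + 1) depth
  else none
termination_by cs.length - j
decreasing_by all_goals omega

-- A's outer `while i < n` loop; fuel only totalizes the port (on inputs satisfying Pre_ the scanner
-- always advances, the fuel never runs out, and Python's livelock branch is unreachable)
def pvA_loop (cs : List Char) : Nat → Nat → List (List Char) → List (List Char)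
  | 0, _, acc => acc
  | fuel + 1, i, acc =>
    if i < cs.length then
      if cs.getD i ' ' = ';' then pvA_loop cs fuel (pvA_skipComment cs i) acc
      else if pvA_actionAt cs i then
        match pvA_scan cs i 0 with
        | some j =>
            pvA_loop cs fuel (j + 1)
              (acc ++ [PySem.List.slice cs (some ((pvA_back cs i : Nat) : Int)) (some ((j : Int) + 1))])
        | none => pvA_loop cs fuel i acc   -- Python loops forever here (excluded by Pre_)
      else pvA_loop cs fuel (i + 1) acc
    else acc

def extract_actions_blocks (domain_text : String) : String × List String × String :=
  let cs := domain_text.toList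
  let blocks := pvA_loop cs (cs.length + 1) 0 []
  if blocks = [] then (domain_text, [], "")
  else
    let first := PySem.List.pyGetD blocks 0 []
    let first_pos := PySem.Chars.find cs first
    let header := PySem.Chars.rstrip (PySem.List.slice cs none (some first_pos))
    let last := PySem.List.pyGetD blocks (-1) []
    let last_pos := PySem.Chars.rfind cs last + (last.length : Int)
    -- .lstrip('\n') strips exactly leading '\n' characters
    let footer := List.dropWhile (fun c => c == '\n') (PySem.List.slice cs (some last_pos) none)
    (String.ofList header, blocks.map String.ofList, String.ofList footer)

-- ===== PORT B =====

-- regex alternative `\(:action` with IGNORECASE: the 8 lowered characters at pos spell '(:action'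
def pvB_actionAt (cs : List Char) (pos : Nat) : Bool :=
  pvActionKey.isPrefixOf ((cs.drop pos).map PySem.Chars.lowerChar)

-- end of a regex match `;[^\n]*` starting at e: the next '\n' (or end of text)
def pvB_nl (cs : List Char) (e : Nat) : Nat :=
  if h : e < cs.length then
    if cs.getD e ' ' = '\n' then e else pvB_nl cs (e + 1)
  else cs.length
termination_by cs.length - e
decreasing_by all_goals omega

-- `_TOKEN.search(domain_text, pos)`: the earliest position q ≥ pos where an alternative of
-- `;[^\n]*|\(:action` matches (exact for this pattern: alternatives cannot both match at one q)
def pvB_search (cs : List Char) (pos : Nat) : Option (Nat × Bool) :=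
  if h : pos < cs.length then
    if cs.getD pos ' ' = ';' then some (pos, true)
    else if pvB_actionAt cs pos then some (pos, false)
    else pvB_search cs (pos + 1)
  else none
termination_by cs.length - pos
decreasing_by all_goals omega

-- `len(domain_text[:i].rstrip(' \t\n'))`
def pvB_start (cs : List Char) (i : Nat) : Nat :=
  (List.dropWhile (fun c => c == ' ' || c == '\t' || c == '\n') ((cs.take i).reverse)).length

-- B's inner loop: depth += (c == '(') - (c == ')'), stop when depth hits 0
def pvB_scan (cs : List Char) (j : Nat) (depth : Int) : Option Nat :=
  if h : j < cs.length then
    let d := depth + (if cs.getD j ' ' = '(' then 1 else 0) - (if cs.getD j ' ' = ')' then 1 else 0)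
    if d = 0 then some j else pvB_scan cs (j + 1) d
  else none
termination_by cs.length - j
decreasing_by all_goals omega

-- B's `while True` search loop; fuel only totalizes the port (pos strictly increases)
def pvB_loop (cs : List Char) : Nat → Nat → List (List Char) → List (List Char)
  | 0, _, acc => acc
  | fuel + 1, pos, acc =>
    match pvB_search cs pos with
    | none => acc
    | some (q, true) => pvB_loop cs fuel (pvB_nl cs q) acc
    | some (q, false) =>
        let start := pvB_start cs q
        match pvB_scan cs q 0 with
        | some j => pvB_loop cs fuel (j + 1) (acc ++ [(cs.drop start).take (j + 1 - start)])
        | none => pvB_loop cs fuel (cs.length + 1) acc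
    termination_by fuel => fuel

def extract_actions_blocks_alt (domain_text : String) : String × List String × String :=
  let cs := domain_text.toList
  let blocks := pvB_loop cs (cs.length + 2) 0 []
  if blocks = [] then (domain_text, [], "")
  else
    let first := PySem.List.pyGetD blocks 0 []
    let first_pos := PySem.Chars.find cs first
    let header := PySem.Chars.rstrip (PySem.List.slice cs none (some first_pos))
    let last := PySem.List.pyGetD blocks (-1) []
    let last_pos := PySem.Chars.rfind cs last + (last.length : Int)
    let footer := List.dropWhile (fun c => c == '\n') (PySem.List.slice cs (some last_pos) none)
    (String.ofList header, blocks.map String.ofList, String.ofList footer)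

-- ===== PRECONDITION & SPEC =====

-- some j ≥ i closes the paren group opened at i: cs[j] = ')' and '(' / ')' counts over cs[i..j] agree
def pvBalancedFrom (cs : List Char) (i : Nat) : Prop :=
  ∃ j < cs.length, i ≤ j ∧ cs.getD j ' ' = ')' ∧
    ((cs.drop i).take (j + 1 - i)).count '(' = ((cs.drop i).take (j + 1 - i)).count ')'

-- Pre_ excludes inputs containing a case-insensitive '(:action' occurrence whose parentheses never
-- balance: on those A's scanner livelocks when it reaches the occurrence outside a comment; the
-- balance condition is stated for ALL occurrences (even commented-out ones, where A still returns
-- and agrees with B) to stay closed-form.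
def Pre_extract_actions_blocks (domain_text : String) : Prop :=
  ∀ i < domain_text.toList.length,
    (i + 8 ≤ domain_text.toList.length ∧
      PySem.Chars.lower ((domain_text.toList.drop i).take 8) = pvActionKey) →
    pvBalancedFrom domain_text.toList i

instance (domain_text : String) : Decidable (Pre_extract_actions_blocks domain_text) := by
  unfold Pre_extract_actions_blocks pvBalancedFrom; infer_instance

def pvWitness_extract_actions_blocks : String := "(define\n; hi\n(:action a\n :p ())\n)"

def Spec_extract_actions_blocks (domain_text : String) (out : String × List String × String) : Prop := out = extract_actions_blocks_alt domain_text
instance (domain_text : String) (out : String × List String × String) : Decidable (Spec_extract_actions_blocks domain_text out) := by unfold Spec_extract_actions_blocks; infer_instance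

-- ===== CLAIM (what is proved, stated in full; the proofs are below) =====
def Claim_equal_extract_actions_blocks : Prop := ∀ (domain_text : String), Dom_extract_actions_blocks domain_text → Pre_extract_actions_blocks domain_text → Spec_extract_actions_blocks domain_text (extract_actions_blocks domain_text)

-- ===== LEMMAS AND PROOFS =====

theorem pv_actionAt_iff (cs : List Char) (i : Nat) :
    pvA_actionAt cs i = true ↔
      i + 8 ≤ cs.length ∧ PySem.Chars.lower ((cs.drop i).take 8) = pvActionKey := by
  have h8 : ((i : Int) + 8) = ((i + 8 : Nat) : Int) := by push_cast; ring
  rw [pvA_actionAt, h8, PySem.List.slice_natCast]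
  simp only [Bool.and_eq_true, decide_eq_true_eq, beq_iff_eq]
  rw [show i + 8 - i = 8 from by omega]

theorem pv_actionAt_B_iff (cs : List Char) (i : Nat) :
    pvB_actionAt cs i = true ↔
      i + 8 ≤ cs.length ∧ PySem.Chars.lower ((cs.drop i).take 8) = pvActionKey := by
  rw [pvB_actionAt, List.isPrefixOf_iff_prefix, List.prefix_iff_eq_take]
  have hk : pvActionKey.length = 8 := by decide
  rw [hk, ← List.map_take, PySem.Chars.lower]
  constructor
  · intro h
    have hl := congrArg List.length h
    simp only [hk, List.length_map, List.length_take, List.length_drop] at hl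
    exact ⟨by omega, h.symm⟩
  · rintro ⟨-, h⟩; exact h.symm

theorem pv_actionAt_B_eq_A (cs : List Char) (i : Nat) :
    pvB_actionAt cs i = pvA_actionAt cs i := by
  by_cases h : pvB_actionAt cs i = true
  · rw [h, ((pv_actionAt_iff cs i).mpr ((pv_actionAt_B_iff cs i).mp h))]
  · rw [Bool.not_eq_true] at h
    rw [h]
    by_cases h2 : pvA_actionAt cs i = true
    · exact absurd ((pv_actionAt_B_iff cs i).mpr ((pv_actionAt_iff cs i).mp h2))
        (by rw [h]; simp)
    · rw [Bool.not_eq_true] at h2; rw [h2]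

theorem pv_lowerChar_paren (c : Char) (h : PySem.Chars.lowerChar c = '(') : c = '(' := by
  unfold PySem.Chars.lowerChar at h
  by_cases hu : PySem.Chars.isupper c = true
  · rw [if_pos hu] at h
    unfold PySem.Chars.isupper at hu
    simp only [Bool.and_eq_true, decide_eq_true_eq, Char.le_def, UInt32.le_iff_toNat_le] at hu
    have hb : 65 ≤ c.toNat ∧ c.toNat ≤ 90 := hu
    have h40 : (Char.ofNat (c.toNat + 32)).toNat = 40 := by rw [h]; decide
    rw [Char.toNat_ofNat, if_pos (by left; omega)] at h40
    omega
  · rw [if_neg hu] at h; exact h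

theorem pv_head (cs : List Char) (i : Nat) (h8 : i + 8 ≤ cs.length)
    (hl : PySem.Chars.lower ((cs.drop i).take 8) = pvActionKey) :
    cs.getD i ' ' = '(' := by
  have hi : i < cs.length := by omega
  rw [List.drop_eq_getElem_cons hi, show (8:Nat) = 7+1 from rfl, List.take_succ_cons,
    PySem.Chars.lower, List.map_cons] at hl
  simp only [pvActionKey, List.cons.injEq] at hl
  rw [List.getD_eq_getElem cs ' ' hi]
  exact pv_lowerChar_paren _ hl.1

theorem pv_back_eq_start (cs : List Char) (i : Nat) (h : i ≤ cs.length) :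
    pvA_back cs i = pvB_start cs i := by
  induction i with
  | zero => rw [pvA_back]; simp [pvB_start]
  | succ i ih =>
    have hi : i < cs.length := by omega
    have hg : cs.getD i ' ' = cs[i] := List.getD_eq_getElem cs ' ' hi
    have htake : (cs.take (i+1)).reverse = cs[i] :: (cs.take i).reverse := by
      rw [List.take_add_one]; simp [List.getElem?_eq_getElem hi]
    rw [pvA_back]
    simp only [Nat.add_sub_cancel, hg, pvB_start, htake, List.dropWhile_cons]
    by_cases hw : cs[i] = ' ' ∨ cs[i] = '\t' ∨ cs[i] = '\n'
    · rw [if_pos ⟨by omega, by simp only [List.mem_cons]; tauto⟩,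
        if_pos (by rcases hw with h1 | h1 | h1 <;> simp [h1])]
      simpa [pvB_start] using ih (by omega)
    · have hw' : ¬(cs[i] = ' ') ∧ ¬(cs[i] = '\t') ∧ ¬(cs[i] = '\n') := by tauto
      rw [if_neg (by simp only [List.mem_cons]; tauto),
        if_neg (by simp [hw'.1, hw'.2.1, hw'.2.2])]
      simp [List.length_take]
      omega

theorem pv_scan_B_eq_A (cs : List Char) (k : Nat) :
    ∀ j d, cs.length - j ≤ k → 1 ≤ d → pvB_scan cs j d = pvA_scan cs j d := by
  induction k with
  | zero =>
    intro j d hk _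
    rw [pvB_scan, pvA_scan, dif_neg (by omega), dif_neg (by omega)]
  | succ k ih =>
    intro j d hk hd
    by_cases hj : j < cs.length
    · rw [pvB_scan, pvA_scan, dif_pos hj, dif_pos hj]
      by_cases hc1 : cs.getD j ' ' = '('
      · simp only [hc1]
        simp
        rw [if_neg (by omega : ¬d + 1 = 0)]
        exact ih (j+1) (d+1) (by omega) (by omega)
      · by_cases hc2 : cs.getD j ' ' = ')'
        · simp only [hc2]
          simp
          by_cases hz : d - 1 = 0
          · rw [if_pos hz, if_pos hz]
          · rw [if_neg hz, if_neg hz]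
            exact ih (j+1) (d-1) (by omega) (by omega)
        · simp only [if_neg hc1, if_neg hc2, add_zero, sub_zero]
          rw [if_neg (by omega : ¬d = 0)]
          exact ih (j+1) d (by omega) hd
    · rw [pvB_scan, pvA_scan, dif_neg hj, dif_neg hj]

theorem pv_scan_zero_eq (cs : List Char) (i : Nat) (hi : i < cs.length)
    (hc : cs.getD i ' ' = '(') : pvB_scan cs i 0 = pvA_scan cs i 0 := by
  rw [pvB_scan, pvA_scan, dif_pos hi, dif_pos hi]
  simp only [hc]
  simp
  exact pv_scan_B_eq_A cs (cs.length - (i+1)) (i+1) 1 (by omega) (by omega)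

theorem pv_scan_bounds (cs : List Char) (k : Nat) :
    ∀ j d j', cs.length - j ≤ k → pvA_scan cs j d = some j' → j ≤ j' ∧ j' < cs.length := by
  induction k with
  | zero =>
    intro j d j' hk h
    rw [pvA_scan, dif_neg (by omega)] at h
    exact absurd h (by simp)
  | succ k ih =>
    intro j d j' hk h
    by_cases hj : j < cs.length
    · rw [pvA_scan, dif_pos hj] at h
      by_cases hc1 : cs.getD j ' ' = '('
      · simp only [hc1] at h
        simp at h
        have := ih (j+1) (d+1) j' (by omega) h
        omega
      · by_cases hc2 : cs.getD j ' ' = ')'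
        · simp only [hc2] at h
          simp [hc1] at h
          by_cases hz : d - 1 = 0
          · rw [if_pos hz] at h
            cases h
            omega
          · rw [if_neg hz] at h
            have := ih (j+1) (d-1) j' (by omega) h
            omega
        · simp only [if_neg hc1, if_neg hc2] at h
          have := ih (j+1) d j' (by omega) h
          omega
    · rw [pvA_scan, dif_neg hj] at h
      exact absurd h (by simp)

theorem pv_seg_cons (cs : List Char) (j k : Nat) (hj : j < cs.length) (hjk : j ≤ k) :
    (cs.drop j).take (k + 1 - j) = cs.getD j ' ' :: (cs.drop (j+1)).take (k + 1 - (j+1)) := by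
  rw [show k + 1 - (j + 1) = k - j from by omega, List.drop_eq_getElem_cons hj,
    show k + 1 - j = (k - j) + 1 from by omega, List.take_succ_cons, List.getD_eq_getElem cs ' ' hj]

theorem pv_scan_isSome (cs : List Char) (k : Nat) :
    ∀ (j : Nat) (d : Int), cs.length - j ≤ k →
    (∃ k' < cs.length, j ≤ k' ∧ cs.getD k' ' ' = ')' ∧
      d + ((cs.drop j).take (k' + 1 - j)).count '(' = ((cs.drop j).take (k' + 1 - j)).count ')') →
    (pvA_scan cs j d).isSome := by
  induction k with
  | zero =>
    intro j d hk h
    obtain ⟨k', hk1, hk2, _, _⟩ := h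
    omega
  | succ k ih =>
    intro j d hk h
    obtain ⟨k', hk1, hk2, hk3, hk4⟩ := h
    have hj : j < cs.length := by omega
    have hseg := pv_seg_cons cs j k' hj hk2
    rw [pvA_scan, dif_pos hj]
    by_cases hc1 : cs.getD j ' ' = '('
    · simp only [hc1]
      simp
      have hkj : j < k' := by
        have hne : j ≠ k' := fun he => by rw [he, hk3] at hc1; exact absurd hc1 (by decide)
        omega
      apply ih (j+1) (d+1) (by omega)
      refine ⟨k', hk1, by omega, hk3, ?_⟩
      rw [hseg, hc1] at hk4
      simp [List.count_cons] at hk4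
      rw [show k' + 1 - (j + 1) = k' - j from by omega]
      omega
    · by_cases hc2 : cs.getD j ' ' = ')'
      · simp only [hc2]
        simp
        by_cases hz : d - 1 = 0
        · rw [if_pos hz]; simp
        · rw [if_neg hz]
          have hkj : j < k' := by
            by_contra hno
            have he : j = k' := by omega
            subst he
            rw [hseg, hc2, show j + 1 - (j + 1) = 0 from by omega] at hk4
            simp [List.count_cons] at hk4
            omega
          apply ih (j+1) (d-1) (by omega)
          refine ⟨k', hk1, by omega, hk3, ?_⟩
          rw [hseg, hc2] at hk4
          simp [List.count_cons] at hk4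
          rw [show k' + 1 - (j + 1) = k' - j from by omega]
          omega
      · simp only [if_neg hc1, if_neg hc2]
        have hkj : j < k' := by
          have hne : j ≠ k' := fun he => by rw [he] at hc2; exact absurd hk3 hc2
          omega
        apply ih (j+1) d (by omega)
        refine ⟨k', hk1, by omega, hk3, ?_⟩
        rw [hseg] at hk4
        simp [List.count_cons] at hk4
        have h1 : cs[j]?.getD ' ' ≠ '(' := by simpa [List.getD] using hc1
        have h2 : cs[j]?.getD ' ' ≠ ')' := by simpa [List.getD] using hc2
        rw [if_neg h1, if_neg h2] at hk4
        rw [show k' + 1 - (j + 1) = k' - j from by omega]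
        omega

theorem pv_nl_bounds (cs : List Char) (k : Nat) :
    ∀ i, cs.length - i ≤ k → i ≤ cs.length →
      i ≤ pvB_nl cs i ∧ pvB_nl cs i ≤ cs.length ∧
      (pvB_nl cs i < cs.length → cs.getD (pvB_nl cs i) ' ' = '\n') := by
  induction k with
  | zero =>
    intro i hk hi
    rw [pvB_nl, dif_neg (by omega)]
    exact ⟨by omega, by omega, by omega⟩
  | succ k ih =>
    intro i hk hi
    by_cases h : i < cs.length
    · rw [pvB_nl, dif_pos h]
      by_cases hc : cs.getD i ' ' = '\n'
      · rw [if_pos hc]; exact ⟨le_refl _, by omega, fun _ => hc⟩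
      · rw [if_neg hc]
        have := ih (i+1) (by omega) (by omega)
        exact ⟨by omega, this.2.1, this.2.2⟩
    · rw [pvB_nl, dif_neg h]
      exact ⟨by omega, by omega, by omega⟩

theorem pv_skip_eq_nl (cs : List Char) (k : Nat) :
    ∀ i, cs.length - i ≤ k → i ≤ cs.length →
      pvA_skipComment cs i = if pvB_nl cs i < cs.length then pvB_nl cs i + 1 else cs.length := by
  induction k with
  | zero =>
    intro i hk hi
    rw [pvA_skipComment, pvB_nl, dif_neg (by omega), dif_neg (by omega), if_neg (by omega)]
    omega
  | succ k ih =>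
    intro i hk hi
    by_cases h : i < cs.length
    · rw [pvA_skipComment, pvB_nl, dif_pos h, dif_pos h]
      by_cases hc : cs.getD i ' ' = '\n'
      · rw [if_pos hc, if_pos hc, if_pos h]
      · rw [if_neg hc, if_neg hc]
        exact ih (i+1) (by omega) (by omega)
    · rw [pvA_skipComment, pvB_nl, dif_neg h, dif_neg h, if_neg (by omega)]
      omega

theorem pv_nl_ge_succ (cs : List Char) (i : Nat) (hi : i < cs.length)
    (hc : cs.getD i ' ' ≠ '\n') : i + 1 ≤ pvB_nl cs i := by
  rw [pvB_nl, dif_pos hi, if_neg hc]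
  exact (pv_nl_bounds cs (cs.length - (i+1)) (i+1) (by omega) (by omega)).1

theorem pv_loopB_congr (cs : List Char) (f p p' : Nat) (acc : List (List Char))
    (h : pvB_search cs p = pvB_search cs p') :
    pvB_loop cs (f + 1) p acc = pvB_loop cs (f + 1) p' acc := by
  simp [pvB_loop, h]

theorem pv_search_skip (cs : List Char) (p : Nat) (hp : p < cs.length)
    (h1 : cs.getD p ' ' ≠ ';') (h2 : pvB_actionAt cs p = false) :
    pvB_search cs p = pvB_search cs (p + 1) := by
  rw [pvB_search, dif_pos hp, if_neg h1, if_neg (by simp [h2])]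

theorem pv_search_none (cs : List Char) (p : Nat) (hp : cs.length ≤ p) :
    pvB_search cs p = none := by
  rw [pvB_search, dif_neg (by omega)]

theorem pvA_loop_stop (cs : List Char) (f i : Nat) (acc : List (List Char))
    (h : ¬ i < cs.length) : pvA_loop cs (f+1) i acc = acc := by
  simp [pvA_loop, h]

theorem pvB_loop_stop (cs : List Char) (f p : Nat) (acc : List (List Char))
    (h : cs.length ≤ p) : pvB_loop cs (f+1) p acc = acc := by
  simp [pvB_loop, pv_search_none cs p h]

theorem pv_main (cs : List Char)
    (hpre : ∀ i < cs.length,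
      (i + 8 ≤ cs.length ∧ PySem.Chars.lower ((cs.drop i).take 8) = pvActionKey) →
      pvBalancedFrom cs i) :
    ∀ m i acc fA fB, cs.length - i ≤ m → cs.length - i < fA → cs.length - i < fB →
      pvA_loop cs fA i acc = pvB_loop cs fB i acc := by
  intro m
  induction m with
  | zero =>
    intro i acc fA fB hm hA hB
    obtain ⟨fA', rfl⟩ : ∃ f, fA = f + 1 := ⟨fA - 1, by omega⟩
    obtain ⟨fB', rfl⟩ : ∃ f, fB = f + 1 := ⟨fB - 1, by omega⟩
    rw [pvA_loop_stop cs fA' i acc (by omega), pvB_loop_stop cs fB' i acc (by omega)]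
  | succ m ih =>
    intro i acc fA fB hm hA hB
    obtain ⟨fA', rfl⟩ : ∃ f, fA = f + 1 := ⟨fA - 1, by omega⟩
    obtain ⟨fB', rfl⟩ : ∃ f, fB = f + 1 := ⟨fB - 1, by omega⟩
    by_cases hi : i < cs.length
    · have hg : cs.getD i ' ' = cs[i] := List.getD_eq_getElem cs ' ' hi
      by_cases hsemi : cs.getD i ' ' = ';'
      · -- comment branch
        have hsemi' : cs[i] = ';' := by rw [← hg]; exact hsemi
        have hAstep : pvA_loop cs (fA'+1) i acc = pvA_loop cs fA' (pvA_skipComment cs i) acc := by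
          simp [pvA_loop, hi, hsemi']
        have hs : pvB_search cs i = some (i, true) := by
          rw [pvB_search, dif_pos hi, if_pos hsemi]
        have hBstep : pvB_loop cs (fB'+1) i acc = pvB_loop cs fB' (pvB_nl cs i) acc := by
          simp [pvB_loop, hs]
        have hnlb := pv_nl_bounds cs (cs.length - i) i (by omega) (by omega)
        have hge : i + 1 ≤ pvB_nl cs i :=
          pv_nl_ge_succ cs i hi (by rw [hsemi]; decide)
        have hskip := pv_skip_eq_nl cs (cs.length - i) i (by omega) (by omega)
        rw [hAstep, hBstep, hskip]
        by_cases hee : pvB_nl cs i < cs.length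
        · rw [if_pos hee]
          obtain ⟨fB'', rfl⟩ : ∃ f, fB' = f + 1 := ⟨fB' - 1, by omega⟩
          have hcongr : pvB_search cs (pvB_nl cs i) = pvB_search cs (pvB_nl cs i + 1) := by
            apply pv_search_skip cs (pvB_nl cs i) hee
            · rw [hnlb.2.2 hee]; decide
            · by_contra hb
              rw [Bool.not_eq_false] at hb
              obtain ⟨h8, hl⟩ := (pv_actionAt_B_iff cs (pvB_nl cs i)).mp hb
              have := pv_head cs (pvB_nl cs i) h8 hl
              rw [hnlb.2.2 hee] at this
              exact absurd this (by decide)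
          rw [pv_loopB_congr cs fB'' (pvB_nl cs i) (pvB_nl cs i + 1) acc hcongr]
          exact ih (pvB_nl cs i + 1) acc fA' (fB''+1) (by omega) (by omega) (by omega)
        · rw [if_neg hee]
          have hen : pvB_nl cs i = cs.length := by omega
          rw [hen]
          exact ih cs.length acc fA' fB' (by omega) (by omega) (by omega)
      · have hsemi' : ¬ cs[i] = ';' := by rw [← hg]; exact hsemi
        by_cases hact : pvA_actionAt cs i = true
        · -- action branch
          obtain ⟨h8, hl⟩ := (pv_actionAt_iff cs i).mp hact
          have hpar : cs.getD i ' ' = '(' := pv_head cs i h8 hl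
          have hsome : (pvA_scan cs i 0).isSome := by
            apply pv_scan_isSome cs (cs.length - i) i 0 (by omega)
            obtain ⟨j, hj1, hj2, hj3, hj4⟩ := hpre i hi ⟨h8, hl⟩
            refine ⟨j, hj1, hj2, hj3, ?_⟩
            omega
          obtain ⟨j, hj⟩ := Option.isSome_iff_exists.mp hsome
          have hbounds := pv_scan_bounds cs (cs.length - i) i 0 j (by omega) hj
          have hAstep : pvA_loop cs (fA'+1) i acc = pvA_loop cs fA' (j+1)
              (acc ++ [PySem.List.slice cs (some ((pvA_back cs i : Nat) : Int))
                (some ((j : Int) + 1))]) := by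
            simp [pvA_loop, hi, hsemi', hact, hj]
          have hs : pvB_search cs i = some (i, false) := by
            rw [pvB_search, dif_pos hi, if_neg hsemi,
              if_pos (by rw [pv_actionAt_B_eq_A]; exact hact)]
          have hscan : pvB_scan cs i 0 = some j := by
            rw [pv_scan_zero_eq cs i hi hpar]; exact hj
          have hBstep : pvB_loop cs (fB'+1) i acc = pvB_loop cs fB' (j+1)
              (acc ++ [(cs.drop (pvB_start cs i)).take (j + 1 - pvB_start cs i)]) := by
            simp [pvB_loop, hs, hscan]
          rw [hAstep, hBstep]
          have hseq : PySem.List.slice cs (some ((pvA_back cs i : Nat) : Int))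
              (some ((j : Int) + 1)) = (cs.drop (pvB_start cs i)).take (j + 1 - pvB_start cs i) := by
            rw [pv_back_eq_start cs i (by omega),
              show ((j:Int)+1) = ((j+1 : Nat) : Int) from by push_cast; ring,
              PySem.List.slice_natCast]
          rw [hseq]
          exact ih (j+1) _ fA' fB' (by omega) (by omega) (by omega)
        · -- plain character
          have hAstep : pvA_loop cs (fA'+1) i acc = pvA_loop cs fA' (i+1) acc := by
            simp [pvA_loop, hi, hsemi', hact]
          have hactB : pvB_actionAt cs i = false := by
            rw [pv_actionAt_B_eq_A]
            exact Bool.not_eq_true _ |>.mp hact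
          rw [hAstep, pv_loopB_congr cs fB' i (i+1) acc (pv_search_skip cs i hi hsemi hactB)]
          exact ih (i+1) acc fA' (fB'+1) (by omega) (by omega) (by omega)
    · rw [pvA_loop_stop cs fA' i acc hi, pvB_loop_stop cs fB' i acc (by omega)]

-- ===== VERDICT (by name: the statement is the Claim_ definition above) =====
theorem extract_actions_blocks_spec : Claim_equal_extract_actions_blocks := by
  intro s _hdom hpre
  unfold Spec_extract_actions_blocks extract_actions_blocks extract_actions_blocks_alt
  have hb : pvA_loop s.toList (s.toList.length + 1) 0 [] =
      pvB_loop s.toList (s.toList.length + 2) 0 [] :=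
    pv_main s.toList hpre (s.toList.length) 0 [] _ _ (by omega) (by omega) (by omega)
  simp only [hb]
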